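-- pv_equiv track=rewrite | github.com/TafsirGna/LspSolver | src/LspLibrary/lspLibrary.py | previousPeriodItemOf
-- ===== SOURCE A (Python) =====
-- def previousPeriodItemOf(indice, solution):
--
-- 	if indice > 0:
-- 		if solution[indice-1] != 0:
-- 			return solution[indice-1], indice-1
-- 		else:
-- 			j = indice-1
-- 			while j >= 0:
-- 				if solution[j] != 0:
-- 					return solution[j], j
-- 				j-=1
-- 			return 0,0
-- 	else:
-- 		# The case where the variable indice corresponds to the first period and then, there's no previous period's item
-- 		return 0,0
-- ===== SOURCE B (Python) =====
-- def previousPeriodItemOf(indice, solution):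
--     idxs = [j for j in range(indice) if solution[j] != 0]
--     if idxs:
--         k = idxs[-1]
--         return solution[k], k
--     return 0, 0
-- ===== Notes on version B (the rewrite author's own statement) =====
-- stated objective: simpler
-- what changed: Replaces the guarded early-exit backward scan (with its redundant first-element special case) by a collect-then-select decomposition: gather all prefix indices with nonzero value in one forward comprehension and take the last one.
import Mathlib
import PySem

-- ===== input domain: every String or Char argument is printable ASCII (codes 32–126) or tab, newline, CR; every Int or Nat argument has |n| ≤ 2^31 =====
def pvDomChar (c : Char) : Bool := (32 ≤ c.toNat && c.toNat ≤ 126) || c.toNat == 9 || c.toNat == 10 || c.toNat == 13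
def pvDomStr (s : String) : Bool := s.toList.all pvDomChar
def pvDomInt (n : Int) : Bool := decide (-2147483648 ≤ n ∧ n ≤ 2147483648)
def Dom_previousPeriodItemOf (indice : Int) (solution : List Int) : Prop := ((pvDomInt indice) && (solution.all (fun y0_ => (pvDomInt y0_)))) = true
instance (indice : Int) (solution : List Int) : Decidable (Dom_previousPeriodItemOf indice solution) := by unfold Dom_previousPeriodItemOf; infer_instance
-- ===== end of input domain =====

-- B replaces A's guarded early-exit backward scan by a collect-then-select decomposition (simpler).

-- ===== PORT A =====
-- the 'while j >= 0' loop of A; the Nat argument n encodes j = n-1 (n = 0 means j < 0, loop exit)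
def pvLoopA (solution : List Int) : Nat → Int × Int
  | 0 => (0, 0)
  | n+1 =>
    if PySem.List.pyGetD solution (n : Int) 0 ≠ 0 then
      (PySem.List.pyGetD solution (n : Int) 0, (n : Int))
    else pvLoopA solution n

def previousPeriodItemOf (indice : Int) (solution : List Int) : Int × Int :=
  if indice > 0 then
    if PySem.List.pyGetD solution (indice - 1) 0 ≠ 0 then
      (PySem.List.pyGetD solution (indice - 1) 0, indice - 1)
    else
      -- j = indice-1, i.e. Nat fuel indice.toNat
      pvLoopA solution indice.toNat
  else (0, 0)

-- ===== PORT B =====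
def previousPeriodItemOf_alt (indice : Int) (solution : List Int) : Int × Int :=
  let idxs := (PySem.List.pyRange 0 indice 1).filter (fun j => PySem.List.pyGetD solution j 0 != 0)
  match idxs.getLast? with
  | some k => (PySem.List.pyGetD solution k 0, k)
  | none => (0, 0)

-- ===== PRECONDITION & SPEC =====
-- Pre_ excludes exactly the inputs where Python A raises IndexError: indice > len(solution).
def Pre_previousPeriodItemOf (indice : Int) (solution : List Int) : Prop := indice ≤ solution.length
instance (indice : Int) (solution : List Int) : Decidable (Pre_previousPeriodItemOf indice solution) := by unfold Pre_previousPeriodItemOf; infer_instance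
def pvWitness_previousPeriodItemOf : Int × List Int := (3, [0, 5, 0])

def Spec_previousPeriodItemOf (indice : Int) (solution : List Int) (out : Int × Int) : Prop := out = previousPeriodItemOf_alt indice solution
instance (indice : Int) (solution : List Int) (out : Int × Int) : Decidable (Spec_previousPeriodItemOf indice solution out) := by unfold Spec_previousPeriodItemOf; infer_instance

-- ===== CLAIM (what is proved, stated in full; the proofs are below) =====
def Claim_equal_previousPeriodItemOf : Prop := ∀ (indice : Int) (solution : List Int), Dom_previousPeriodItemOf indice solution → Pre_previousPeriodItemOf indice solution → Spec_previousPeriodItemOf indice solution (previousPeriodItemOf indice solution)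

-- ===== LEMMAS AND PROOFS =====

-- B's value at fuel n, as a function of the prefix range 0..n-1
def pvSelB (solution : List Int) (n : Nat) : Int × Int :=
  match ((PySem.List.pyRange 0 (n : Int) 1).filter
      (fun j => PySem.List.pyGetD solution j 0 != 0)).getLast? with
  | some k => (PySem.List.pyGetD solution k 0, k)
  | none => (0, 0)

theorem pvLoopA_eq_selB (solution : List Int) (n : Nat) :
    pvLoopA solution n = pvSelB solution n := by
  induction n with
  | zero => simp [pvLoopA, pvSelB]
  | succ n ih =>
    have hsplit : PySem.List.pyRange 0 ((n : Int) + 1) 1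
        = PySem.List.pyRange 0 (n : Int) 1 ++ [(n : Int)] :=
      PySem.List.pyRange_one_succ_right (by positivity)
    unfold pvSelB
    push_cast
    rw [hsplit, List.filter_append]
    by_cases h : PySem.List.pyGetD solution (n : Int) 0 = 0
    · simp [pvLoopA, h, ih, pvSelB]
    · simp only [pvLoopA, PySem.List.pyGetD_natCast] at h ⊢
      rw [List.getD_eq_getElem?_getD] at h
      simp [h]

theorem alt_eq_selB (indice : Int) (solution : List Int) (h : 0 ≤ indice) :
    previousPeriodItemOf_alt indice solution = pvSelB solution indice.toNat := by
  unfold previousPeriodItemOf_alt pvSelB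
  rw [Int.toNat_of_nonneg h]

theorem previousPeriodItemOf_spec' (indice : Int) (solution : List Int) :
    previousPeriodItemOf indice solution = previousPeriodItemOf_alt indice solution := by
  unfold previousPeriodItemOf
  by_cases hpos : indice > 0
  · rw [alt_eq_selB indice solution (le_of_lt hpos)]
    -- fuel indice.toNat = m+1 with (m : Int) = indice - 1
    obtain ⟨m, hm⟩ : ∃ m : Nat, indice.toNat = m + 1 :=
      ⟨indice.toNat - 1, by omega⟩
    have hmi : (m : Int) = indice - 1 := by omega
    rw [← pvLoopA_eq_selB, hm]
    by_cases h : PySem.List.pyGetD solution (indice - 1) 0 ≠ 0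
    · simp [pvLoopA, hmi, h, hpos]
    · simp [pvLoopA, hmi, h, hpos]
  · have : PySem.List.pyRange 0 indice 1 = [] :=
      PySem.List.pyRange_one_eq_nil (by omega)
    simp [previousPeriodItemOf_alt, this, hpos]

-- ===== VERDICT (by name: the statement is the Claim_ definition above) =====
theorem previousPeriodItemOf_spec : Claim_equal_previousPeriodItemOf := by
  intro indice solution _ _
  unfold Spec_previousPeriodItemOf
  exact previousPeriodItemOf_spec' indice solution
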